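-- pv_equiv track=rewrite | github.com/luizt4vares/Fuzzy | data/cods/bucket.py | bucket_create
-- ===== SOURCE A (Python) =====
-- def bucket_create(dados:list) -> list:
--     def price_check(val:int) -> str:
--         if val <10:
--             return "<10"
--         elif val <20:
--             return "<20"
--         elif val<40:
--             return "<40"
--         elif val<80:
--             return "<80"
--         elif val<100:
--             return '<100'
--         elif val<200:
--             return "<200"
--         elif val<300:
--             return "<300"
--         elif val >=300:
--             return ">=300"
--
--     lista = [price_check(x) for x in dados]
--     return lista
-- ===== SOURCE B (Python) =====
-- _BOUNDS = [10, 20, 40, 80, 100, 200, 300]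
-- _LABELS = ["<10", "<20", "<40", "<80", "<100", "<200", "<300", ">=300"]
--
-- def bucket_create(dados: list) -> list:
--     return [_LABELS[sum(1 for b in _BOUNDS if x >= b)] for x in dados]
-- ===== Notes on version B (the rewrite author's own statement) =====
-- stated objective: idiomatic
-- what changed: Replaces the eight-branch if/elif ladder with two parallel constant tables (bounds and labels): the label index is the count of bounds not exceeding the value, so the decision logic becomes a table lookup.
import Mathlib
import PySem

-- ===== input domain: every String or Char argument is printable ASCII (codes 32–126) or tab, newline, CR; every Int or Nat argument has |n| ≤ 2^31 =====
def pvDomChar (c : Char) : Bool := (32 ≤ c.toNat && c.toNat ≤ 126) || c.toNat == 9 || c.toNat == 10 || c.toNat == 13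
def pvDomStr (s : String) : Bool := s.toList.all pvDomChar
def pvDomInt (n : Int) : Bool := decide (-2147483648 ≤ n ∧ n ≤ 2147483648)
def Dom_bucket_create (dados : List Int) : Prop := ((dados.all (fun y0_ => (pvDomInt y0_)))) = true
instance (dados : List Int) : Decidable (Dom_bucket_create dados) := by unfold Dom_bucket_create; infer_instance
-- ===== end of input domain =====

-- B replaces A's if/elif ladder with parallel bounds/labels tables and an index count; objective: idiomatic.


-- ===== PORT A =====
-- literal transliteration of A's if/elif ladder; the final 'else' arm is the
-- 'elif val >= 300' branch (over Int it is reached exactly when 300 ≤ val).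
def pcA (val : Int) : String :=
  if val < 10 then "<10"
  else if val < 20 then "<20"
  else if val < 40 then "<40"
  else if val < 80 then "<80"
  else if val < 100 then "<100"
  else if val < 200 then "<200"
  else if val < 300 then "<300"
  else ">=300"

def bucket_create (dados : List Int) : List String := dados.map pcA

-- ===== PORT B =====
def pvBounds : List Int := [10, 20, 40, 80, 100, 200, 300]

def pvLabels : List String := ["<10", "<20", "<40", "<80", "<100", "<200", "<300", ">=300"]

-- sum(1 for b in _BOUNDS if x >= b) as a fold; _LABELS[idx] (idx always in range)
def bucket_create_alt (dados : List Int) : List String :=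
  dados.map (fun x =>
    pvLabels.getD (pvBounds.foldl (fun acc b => if x ≥ b then acc + 1 else acc) 0) "")

-- ===== PRECONDITION & SPEC =====
def Spec_bucket_create (dados : List Int) (out : List String) : Prop := out = bucket_create_alt dados
instance (dados : List Int) (out : List String) : Decidable (Spec_bucket_create dados out) := by unfold Spec_bucket_create; infer_instance

-- ===== CLAIM (what is proved, stated in full; the proofs are below) =====
def Claim_equal_bucket_create : Prop := ∀ (dados : List Int), Dom_bucket_create dados → Spec_bucket_create dados (bucket_create dados)

-- ===== LEMMAS AND PROOFS =====

-- ===== VERDICT (by name: the statement is the Claim_ definition above) =====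
lemma pc_eq (x : Int) :
    pcA x = pvLabels.getD (pvBounds.foldl (fun acc b => if x ≥ b then acc + 1 else acc) 0) "" := by
  simp only [pvBounds, List.foldl, ge_iff_le]
  rcases lt_or_ge x 10 with h | h10
  · rw [pcA, if_pos h]
    simp [show ¬(10:Int) ≤ x by omega, show ¬(20:Int) ≤ x by omega,
      show ¬(40:Int) ≤ x by omega, show ¬(80:Int) ≤ x by omega,
      show ¬(100:Int) ≤ x by omega, show ¬(200:Int) ≤ x by omega,
      show ¬(300:Int) ≤ x by omega, pvLabels]
  · rcases lt_or_ge x 20 with h | h20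
    · rw [pcA, if_neg (by omega), if_pos h]
      simp [h10, show ¬(20:Int) ≤ x by omega, show ¬(40:Int) ≤ x by omega,
        show ¬(80:Int) ≤ x by omega, show ¬(100:Int) ≤ x by omega,
        show ¬(200:Int) ≤ x by omega, show ¬(300:Int) ≤ x by omega, pvLabels]
    · rcases lt_or_ge x 40 with h | h40
      · rw [pcA, if_neg (by omega), if_neg (by omega), if_pos h]
        simp [h10, h20, show ¬(40:Int) ≤ x by omega, show ¬(80:Int) ≤ x by omega,
          show ¬(100:Int) ≤ x by omega, show ¬(200:Int) ≤ x by omega,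
          show ¬(300:Int) ≤ x by omega, pvLabels]
      · rcases lt_or_ge x 80 with h | h80
        · rw [pcA, if_neg (by omega), if_neg (by omega), if_neg (by omega), if_pos h]
          simp [h10, h20, h40, show ¬(80:Int) ≤ x by omega,
            show ¬(100:Int) ≤ x by omega, show ¬(200:Int) ≤ x by omega,
            show ¬(300:Int) ≤ x by omega, pvLabels]
        · rcases lt_or_ge x 100 with h | h100
          · rw [pcA, if_neg (by omega), if_neg (by omega), if_neg (by omega),
              if_neg (by omega), if_pos h]
            simp [h10, h20, h40, h80, show ¬(100:Int) ≤ x by omega,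
              show ¬(200:Int) ≤ x by omega, show ¬(300:Int) ≤ x by omega, pvLabels]
          · rcases lt_or_ge x 200 with h | h200
            · rw [pcA, if_neg (by omega), if_neg (by omega), if_neg (by omega),
                if_neg (by omega), if_neg (by omega), if_pos h]
              simp [h10, h20, h40, h80, h100, show ¬(200:Int) ≤ x by omega,
                show ¬(300:Int) ≤ x by omega, pvLabels]
            · rcases lt_or_ge x 300 with h | h300
              · rw [pcA, if_neg (by omega), if_neg (by omega), if_neg (by omega),
                  if_neg (by omega), if_neg (by omega), if_neg (by omega), if_pos h]
                simp [h10, h20, h40, h80, h100, h200,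
                  show ¬(300:Int) ≤ x by omega, pvLabels]
              · rw [pcA, if_neg (by omega), if_neg (by omega), if_neg (by omega),
                  if_neg (by omega), if_neg (by omega), if_neg (by omega), if_neg (by omega)]
                simp [h10, h20, h40, h80, h100, h200, h300, pvLabels]

-- ===== VERDICT (by name: the statement is the Claim_ definition above) =====
theorem bucket_create_spec : Claim_equal_bucket_create := by
  intro dados _
  unfold Spec_bucket_create bucket_create bucket_create_alt
  exact List.map_congr_left (fun x _ => pc_eq x)
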